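-- pv_equiv track=rewrite | github.com/Moras-del/rsa | utils.py | transformToBlocks
-- ===== SOURCE A (Python) =====
-- def transformToBlocks(data, blocksNum, const):
--     remainder = len(data) % blocksNum
--     result = []
--     for i in range(0, len(data)-remainder, blocksNum):
--         summed = 0
--         for j in range(blocksNum):
--             summed += ord(data[i+j])*const**j
--         result.append(summed)
--     summed = 0
--     for i in range(len(data)-remainder, len(data)):
--         summed += ord(data[i])*const**(i-(len(data)-remainder))
--     if summed != 0:
--         result.append(summed)
--     return result
-- ===== SOURCE B (Python) =====
-- def transformToBlocks(data, blocksNum, const):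
--     def horner(chunk):
--         acc = 0
--         for c in reversed(chunk):
--             acc = ord(c) + const * acc
--         return acc
--     result = []
--     i = 0
--     while i + blocksNum <= len(data):
--         result.append(horner(data[i:i + blocksNum]))
--         i += blocksNum
--     tail = horner(data[i:])
--     if tail != 0:
--         result.append(tail)
--     return result
-- ===== Notes on version B (the rewrite author's own statement) =====
-- stated objective: faster
-- what changed: B slices the string into blocks and evaluates each block's polynomial with Horner's method (one multiply-add per character) instead of A's index-arithmetic double loop that recomputes const**j by exponentiation for every term.
-- outside the precondition, e.g. on transformToBlocks('abc', 0, 3): A raises ZeroDivisionError, B does not finish within the time limit; on transformToBlocks('abc', -2, 3): A returns [], B does not finish within the time limit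
import Mathlib
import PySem

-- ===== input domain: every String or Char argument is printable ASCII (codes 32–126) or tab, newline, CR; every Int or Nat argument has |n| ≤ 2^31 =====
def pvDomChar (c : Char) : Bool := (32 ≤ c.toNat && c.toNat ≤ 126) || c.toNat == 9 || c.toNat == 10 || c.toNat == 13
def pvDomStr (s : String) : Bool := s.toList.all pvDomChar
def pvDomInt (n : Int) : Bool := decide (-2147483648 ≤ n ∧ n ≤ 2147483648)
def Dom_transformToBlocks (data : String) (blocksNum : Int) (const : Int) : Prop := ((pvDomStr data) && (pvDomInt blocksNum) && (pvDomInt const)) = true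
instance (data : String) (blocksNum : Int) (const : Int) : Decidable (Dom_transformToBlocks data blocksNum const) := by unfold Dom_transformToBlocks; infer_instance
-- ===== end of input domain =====

-- B slices the string into blocks and evaluates each block with Horner's method (one multiply-add
-- per character) instead of A's index-arithmetic double loop recomputing const**j per term (faster).

-- ===== PORT A =====
-- ord(data[i]) : in-range access (guaranteed by Pre_), total form via pyGetD
def pvOrd (l : List Char) (i : Int) : Int := ((PySem.List.pyGetD l i ' ').toNat : Int)

def transformToBlocks (data : String) (blocksNum : Int) (const : Int) : List Int :=
  let n : Int := PySem.Str.len data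
  let remainder : Int := PySem.Int.mod n blocksNum
  let result : List Int :=
    (PySem.List.pyRange 0 (n - remainder) blocksNum).foldl
      (fun result i =>
        let summed : Int :=
          (PySem.List.pyRange 0 blocksNum 1).foldl
            (fun summed j => summed + pvOrd data.toList (i + j) * const ^ j.toNat) 0
        result ++ [summed])
      []
  let summed : Int :=
    (PySem.List.pyRange (n - remainder) n 1).foldl
      (fun summed i => summed + pvOrd data.toList i * const ^ (i - (n - remainder)).toNat) 0
  if summed ≠ 0 then result ++ [summed] else result

-- ===== PORT B =====
def pvHorner (const : Int) (cs : List Char) : Int :=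
  cs.foldr (fun c acc => (c.toNat : Int) + const * acc) 0

def pvChunks (const : Int) (bn : Nat) (cs : List Char) : List Int :=
  if h : 0 < bn ∧ bn ≤ cs.length then
    pvHorner const (cs.take bn) :: pvChunks const bn (cs.drop bn)
  else if pvHorner const cs ≠ 0 then [pvHorner const cs] else []
termination_by cs.length
decreasing_by obtain ⟨h1, h2⟩ := h; simp [List.length_drop]; omega

def transformToBlocks_alt (data : String) (blocksNum : Int) (const : Int) : List Int :=
  if blocksNum ≤ 0 then [] else pvChunks const blocksNum.toNat data.toList

-- ===== PRECONDITION & SPEC =====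
-- Pre_ restricts to the natural domain blocksNum ≥ 1: blocksNum = 0 makes A raise ZeroDivisionError,
-- and for negative blocksNum A's empty ranges accidentally return [] while B's chunking loop diverges.
def Pre_transformToBlocks (data : String) (blocksNum : Int) (const : Int) : Prop := 1 ≤ blocksNum
instance (data : String) (blocksNum : Int) (const : Int) : Decidable (Pre_transformToBlocks data blocksNum const) := by unfold Pre_transformToBlocks; infer_instance

def pvWitness_transformToBlocks : String × Int × Int := ("hello", 2, 3)

def Spec_transformToBlocks (data : String) (blocksNum : Int) (const : Int) (out : List Int) : Prop := out = transformToBlocks_alt data blocksNum const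
instance (data : String) (blocksNum : Int) (const : Int) (out : List Int) : Decidable (Spec_transformToBlocks data blocksNum const out) := by unfold Spec_transformToBlocks; infer_instance

-- ===== CLAIM (what is proved, stated in full; the proofs are below) =====
def Claim_equal_transformToBlocks : Prop := ∀ (data : String) (blocksNum : Int) (const : Int), Dom_transformToBlocks data blocksNum const → Pre_transformToBlocks data blocksNum const → Spec_transformToBlocks data blocksNum const (transformToBlocks data blocksNum const)

-- ===== LEMMAS AND PROOFS =====

-- common normal form both ports are reduced to
def pvBlocksSpec (const : Int) (b : Nat) (l : List Char) : List Int :=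
  (List.range (l.length / b)).map (fun k => pvHorner const ((l.drop (k * b)).take b))
    ++ (if pvHorner const (l.drop ((l.length / b) * b)) ≠ 0
        then [pvHorner const (l.drop ((l.length / b) * b))] else [])

theorem pvHorner_cons (const : Int) (c : Char) (cs : List Char) :
    pvHorner const (c :: cs) = (c.toNat : Int) + const * pvHorner const cs := rfl

theorem pvHorner_eq_sum (const : Int) (cs : List Char) :
    pvHorner const cs
      = ((List.range cs.length).map (fun k => ((cs.getD k ' ').toNat : Int) * const ^ k)).sum := by
  induction cs with
  | nil => simp [pvHorner]
  | cons c cs ih =>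
    rw [show (c :: cs).length = cs.length + 1 from rfl, List.range_succ_eq_map, List.map_cons,
      List.sum_cons, List.map_map]
    have hcomp : ((fun k => (((c :: cs).getD k ' ').toNat : Int) * const ^ k) ∘ Nat.succ)
        = fun k => const * (((cs.getD k ' ').toNat : Int) * const ^ k) := by
      funext k
      simp [Function.comp, List.getD_cons_succ, pow_succ]
      ring
    rw [hcomp, List.sum_map_mul_left, ← ih, pvHorner_cons]
    simp [List.getD_cons_zero]

theorem pvHorner_window (const : Int) (l : List Char) (i m : Nat) (h : i + m ≤ l.length) :
    pvHorner const ((l.drop i).take m)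
      = ((List.range m).map (fun (k : Nat) => pvOrd l ((i : Int) + (k : Int)) * const ^ k)).sum := by
  rw [pvHorner_eq_sum]
  have hlen : ((l.drop i).take m).length = m := by
    simp [List.length_take, List.length_drop]; omega
  rw [hlen]
  refine congrArg List.sum (List.map_congr_left ?_)
  intro k hk
  rw [List.mem_range] at hk
  have h1 : k < ((l.drop i).take m).length := by omega
  rw [List.getD_eq_getElem _ _ h1]
  unfold pvOrd
  rw [PySem.List.pyGetD_eq_getElem l ' ' (by positivity) (by push_cast; omega)]
  have h2 : ((i : Int) + (k : Int)).toNat = i + k := by omega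
  simp [h2, List.getElem_take, List.getElem_drop]

theorem pv_inner_fold (l : List Char) (const : Int) (i b : Nat) (h : i + b ≤ l.length) :
    (PySem.List.pyRange 0 (b : Int) 1).foldl
        (fun summed j => summed + pvOrd l ((i : Int) + j) * const ^ j.toNat) 0
      = pvHorner const ((l.drop i).take b) := by
  rw [PySem.List.pyRange_one, List.foldl_map, PySem.List.foldl_add, zero_add]
  have hc : ((b : Int) - 0).toNat = b := by omega
  rw [hc, pvHorner_window const l i b h]
  refine congrArg List.sum (List.map_congr_left ?_)
  intro k hk
  simp

theorem pv_tail_fold (l : List Char) (const : Int) (a : Nat) (ha : a ≤ l.length) :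
    (PySem.List.pyRange (a : Int) (l.length : Int) 1).foldl
        (fun summed i => summed + pvOrd l i * const ^ (i - (a : Int)).toNat) 0
      = pvHorner const (l.drop a) := by
  rw [PySem.List.pyRange_one, List.foldl_map, PySem.List.foldl_add, zero_add]
  have h1 : ((l.length : Int) - (a : Int)).toNat = l.length - a := by omega
  rw [h1]
  have h2 : l.drop a = (l.drop a).take (l.length - a) :=
    (List.take_of_length_le (by simp)).symm
  rw [h2, pvHorner_window const l a (l.length - a) (by omega)]
  refine congrArg List.sum (List.map_congr_left ?_)
  intro k hk
  rw [List.mem_range] at hk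
  rw [show ((a : Int) + (k : Int) - (a : Int)) = (k : Int) by ring, Int.toNat_natCast]

theorem pv_pyRange_mul (b q : Nat) (hb : 0 < b) :
    PySem.List.pyRange 0 ((q * b : Nat) : Int) ((b : Nat) : Int)
      = (List.range q).map (fun k => ((k * b : Nat) : Int)) := by
  rw [PySem.List.pyRange_of_pos 0 _ (by exact_mod_cast hb)]
  rcases Nat.eq_zero_or_pos q with hq | hq
  · subst hq; simp
  · have hpos : (0 : Int) < ((q * b : Nat) : Int) := by exact_mod_cast Nat.mul_pos hq hb
    rw [if_pos hpos]
    have hcnt : (((q * b : Nat) : Int) - 0 + (b : Int) - 1) = (((q * b + (b - 1)) : Nat) : Int) := by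
      push_cast; omega
    rw [hcnt, show ((((q * b + (b - 1)) : Nat) : Int) / ((b : Nat) : Int))
          = (((q * b + (b - 1)) / b : Nat) : Int) from (Int.natCast_div _ _).symm]
    have hqq : (q * b + (b - 1)) / b = q := by
      rw [Nat.add_comm, Nat.add_mul_div_right _ _ hb, Nat.div_eq_of_lt (by omega)]
      omega
    rw [hqq, Int.toNat_natCast]
    refine List.map_congr_left ?_
    intro k _
    push_cast
    ring

theorem pv_A_form (data : String) (b : Nat) (const : Int) (hb : 0 < b) :
    transformToBlocks data ((b : Nat) : Int) const = pvBlocksSpec const b data.toList := by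
  simp only [transformToBlocks, pvBlocksSpec, PySem.Str.len_eq, PySem.Int.mod_natCast]
  obtain ⟨q, r, hN, hrb, hq⟩ :
      ∃ q r, data.toList.length = q * b + r ∧ r < b ∧ q = data.toList.length / b :=
    ⟨_, _, by rw [mul_comm]; exact (Nat.div_add_mod _ _).symm, Nat.mod_lt _ hb, rfl⟩
  have hmod : data.toList.length % b = r := by
    rw [hN, mul_comm q b, Nat.mul_add_mod, Nat.mod_eq_of_lt hrb]
  rw [hmod]
  rw [show ((data.toList.length : Int) - (r : Int)) = ((q * b : Nat) : Int) from by
    rw [hN]; push_cast; ring]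
  rw [pv_pyRange_mul b q hb, List.foldl_map, PySem.List.foldl_append_singleton_eq_map,
    List.nil_append]
  rw [pv_tail_fold data.toList const (q * b) (by omega)]
  rw [← hq]
  have hite : ∀ (xs ys : List Int) (s : Int), xs = ys →
      (if s ≠ 0 then xs ++ [s] else xs) = ys ++ (if s ≠ 0 then [s] else []) := by
    rintro xs ys s rfl
    split_ifs <;> simp
  refine hite _ _ _ ?_
  refine List.map_congr_left ?_
  intro k hk
  rw [List.mem_range] at hk
  have hkb : k * b + b ≤ data.toList.length := by
    have h1 : (k + 1) * b ≤ q * b := Nat.mul_le_mul_right b (Nat.succ_le_of_lt hk)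
    rw [Nat.succ_mul] at h1
    omega
  exact pv_inner_fold data.toList const (k * b) b hkb

theorem pv_chunks_eq (const : Int) (b : Nat) (hb : 0 < b) :
    ∀ (q : Nat) (l : List Char) (r : Nat), l.length = q * b + r → r < b →
      pvChunks const b l
        = (List.range q).map (fun k => pvHorner const ((l.drop (k * b)).take b))
          ++ (if pvHorner const (l.drop (q * b)) ≠ 0
              then [pvHorner const (l.drop (q * b))] else []) := by
  intro q
  induction q with
  | zero =>
    intro l r hlen hrb
    rw [pvChunks, dif_neg (by rintro ⟨_, h2⟩; omega)]
    simp
  | succ q ih =>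
    intro l r hlen hrb
    have hble : b ≤ l.length := by rw [hlen, Nat.succ_mul]; omega
    rw [pvChunks, dif_pos ⟨hb, hble⟩, List.range_succ_eq_map, List.map_cons]
    simp only [Nat.zero_mul, List.drop_zero, List.map_map, List.cons_append]
    congr 1
    rw [ih (l.drop b) r (by rw [List.length_drop, hlen, Nat.succ_mul]; omega) hrb]
    congr 1
    · refine List.map_congr_left ?_
      intro k _
      simp only [Function.comp, List.drop_drop]
      rw [show b + k * b = Nat.succ k * b from by rw [Nat.succ_mul]; omega]
    · rw [List.drop_drop, show b + q * b = (q + 1) * b from by ring]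

theorem pv_B_form (data : String) (b : Nat) (const : Int) (hb : 0 < b) :
    transformToBlocks_alt data ((b : Nat) : Int) const = pvBlocksSpec const b data.toList := by
  unfold transformToBlocks_alt pvBlocksSpec
  rw [if_neg (by simp; omega), Int.toNat_natCast]
  exact pv_chunks_eq const b hb (data.toList.length / b) data.toList (data.toList.length % b)
    (by rw [mul_comm]; exact (Nat.div_add_mod _ _).symm) (Nat.mod_lt _ hb)

-- ===== VERDICT (by name: the statement is the Claim_ definition above) =====
theorem transformToBlocks_spec : Claim_equal_transformToBlocks := by
  intro data blocksNum const hdom hpre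
  unfold Pre_transformToBlocks at hpre
  unfold Spec_transformToBlocks
  obtain ⟨b, rfl⟩ : ∃ b : Nat, blocksNum = (b : Int) :=
    ⟨blocksNum.toNat, (Int.toNat_of_nonneg (by omega)).symm⟩
  have hb : 0 < b := by exact_mod_cast hpre
  rw [pv_A_form data b const hb, pv_B_form data b const hb]
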